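-- pv_equiv track=rewrite | github.com/dragon1086/emergent | experiments/amp_benchmark.py | count_blind_spots
-- ===== SOURCE A (Python) =====
-- def count_blind_spots(perspectives_off: list[str], perspectives_on: list[str]) -> int:
--     """
--     ON에는 있지만 OFF에는 없는 관점 수 계산.
--     간단한 텍스트 포함 여부 기반 (소문자 비교).
--     """
--     off_lower = " ".join(p.lower() for p in perspectives_off)
--     count = 0
--     for p in perspectives_on:
--         # 3단어 이상인 관점에서 핵심 단어가 OFF에 없으면 blind spot
--         key_words = [w for w in p.lower().split() if len(w) > 3]
--         if key_words and not any(w in off_lower for w in key_words):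
--             count += 1
--     return count
-- ===== SOURCE B (Python) =====
-- def count_blind_spots(perspectives_off: list[str], perspectives_on: list[str]) -> int:
--     off_lower = " ".join(p.lower() for p in perspectives_off)
--     key_lists = [[w for w in p.lower().split() if len(w) > 3] for p in perspectives_on]
--     lengths = {len(w) for ws in key_lists for w in ws}
--     present = {off_lower[i:i + L] for L in lengths for i in range(len(off_lower) - L + 1)}
--     return sum(1 for ws in key_lists if ws and not any(w in present for w in ws))
-- ===== Notes on version B (the rewrite author's own statement) =====
-- stated objective: faster
-- what changed: B precomputes one hash set of all substrings of the joined OFF text whose lengths actually occur among key words, so the counting loop replaces each per-word linear substring scan of the OFF text by an O(1) set lookup.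
import Mathlib
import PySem

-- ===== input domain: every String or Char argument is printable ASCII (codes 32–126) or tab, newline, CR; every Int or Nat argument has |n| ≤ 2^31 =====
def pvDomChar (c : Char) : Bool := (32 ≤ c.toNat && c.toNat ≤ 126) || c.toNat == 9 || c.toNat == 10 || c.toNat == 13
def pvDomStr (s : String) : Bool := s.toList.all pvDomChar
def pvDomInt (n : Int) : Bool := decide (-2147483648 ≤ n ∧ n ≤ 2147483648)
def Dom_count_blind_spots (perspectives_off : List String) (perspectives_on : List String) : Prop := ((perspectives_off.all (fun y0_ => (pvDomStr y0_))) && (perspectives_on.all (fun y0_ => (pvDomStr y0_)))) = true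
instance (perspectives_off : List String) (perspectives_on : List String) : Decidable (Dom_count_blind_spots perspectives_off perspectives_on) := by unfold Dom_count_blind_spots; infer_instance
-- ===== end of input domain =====

-- B replaces A's per-word substring scans of the joined OFF text by one precomputed set of all
-- OFF substrings of the occurring key-word lengths, so the counting loop does only set lookups.

-- ===== PORT A =====
def count_blind_spots (perspectives_off : List String) (perspectives_on : List String) : Int :=
  let off_lower := PySem.Str.join " " (perspectives_off.map (fun p => PySem.Str.lower p))
  perspectives_on.foldl (fun count p =>
    let key_words := (PySem.Str.split₀ (PySem.Str.lower p)).filter (fun w => decide (3 < PySem.Str.len w))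
    if (!key_words.isEmpty) && !(key_words.any (fun w => PySem.Str.isIn w off_lower))
    then count + 1 else count) 0

-- ===== PORT B =====
def count_blind_spots_alt (perspectives_off : List String) (perspectives_on : List String) : Int :=
  let off_lower := PySem.Str.join " " (perspectives_off.map (fun p => PySem.Str.lower p))
  let key_lists := perspectives_on.map (fun p =>
    (PySem.Str.split₀ (PySem.Str.lower p)).filter (fun w => decide (3 < PySem.Str.len w)))
  let lengths : PySem.Set Int := PySem.Set.ofList (key_lists.flatMap (fun ws => ws.map PySem.Str.len))
  let present : PySem.Set String := PySem.Set.ofList (lengths.flatMap (fun L =>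
    (PySem.List.pyRange 0 (PySem.Str.len off_lower - L + 1) 1).map
      (fun i => PySem.Str.slice off_lower (some i) (some (i + L)))))
  (key_lists.map (fun ws =>
    if (!ws.isEmpty) && !(ws.any (fun w => PySem.Set.contains present w))
    then (1 : Int) else 0)).sum

-- ===== PRECONDITION & SPEC =====
def Spec_count_blind_spots (perspectives_off : List String) (perspectives_on : List String) (out : Int) : Prop := out = count_blind_spots_alt perspectives_off perspectives_on
instance (perspectives_off : List String) (perspectives_on : List String) (out : Int) : Decidable (Spec_count_blind_spots perspectives_off perspectives_on out) := by unfold Spec_count_blind_spots; infer_instance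

-- ===== CLAIM (what is proved, stated in full; the proofs are below) =====
def Claim_equal_count_blind_spots : Prop := ∀ (perspectives_off : List String) (perspectives_on : List String), Dom_count_blind_spots perspectives_off perspectives_on → Spec_count_blind_spots perspectives_off perspectives_on (count_blind_spots perspectives_off perspectives_on)

-- ===== LEMMAS AND PROOFS =====

-- a take-after-drop block is an infix
theorem pv_take_drop_infix {α : Type} (l : List α) (a b : Nat) : (l.drop a).take b <:+: l :=
  (List.take_prefix b (l.drop a)).isInfix.trans (List.drop_suffix a l).isInfix

-- membership in B's substring set coincides with Python's `w in off_lower`,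
-- provided w's length occurs in the collected length list (whose entries are positive)
theorem pv_present_eq_isIn (off_lower w : String) (lens : List Int)
    (hpos : ∀ L ∈ lens, 0 < L)
    (hw : (w.toList.length : Int) ∈ lens) :
    PySem.Set.contains (PySem.Set.ofList (lens.flatMap (fun L =>
      (PySem.List.pyRange 0 (PySem.Str.len off_lower - L + 1) 1).map
        (fun i => PySem.Str.slice off_lower (some i) (some (i + L)))))) w
      = PySem.Str.isIn w off_lower := by
  rw [Bool.eq_iff_iff, PySem.Set.contains_iff, PySem.Set.mem_ofList, PySem.Str.isIn_iff_infix]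
  constructor
  · rintro h
    rcases List.mem_flatMap.mp h with ⟨L, hL, hmem⟩
    rcases List.mem_map.mp hmem with ⟨i, hi, hslice⟩
    rcases PySem.List.mem_pyRange_one.mp hi with ⟨hi0, _⟩
    have hL0 : 0 < L := hpos L hL
    have hw' : w.toList = (off_lower.toList.drop i.toNat).take ((i + L).toNat - i.toNat) := by
      rw [← hslice, PySem.Str.toList_slice]
      simp only [PySem.Chars.slice_eq_listSlice]
      rw [PySem.List.slice_toNat _ hi0 (by omega)]
    rw [hw']
    exact pv_take_drop_infix _ _ _
  · rintro ⟨s, t, hst⟩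
    refine List.mem_flatMap.mpr ⟨(w.toList.length : Int), hw, List.mem_map.mpr
      ⟨(s.length : Int), PySem.List.mem_pyRange_one.mpr ⟨by positivity, ?_⟩, ?_⟩⟩
    · have hlen : off_lower.toList.length = s.length + w.toList.length + t.length := by
        rw [← hst]; simp; omega
      rw [PySem.Str.len_eq, hlen]
      push_cast
      omega
    · apply String.toList_inj.mp
      rw [PySem.Str.toList_slice]
      simp only [PySem.Chars.slice_eq_listSlice]
      rw [PySem.List.slice_natCast_add, ← hst, List.append_assoc, List.drop_left,
        List.take_left]

-- pointwise: A's per-perspective test equals B's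
theorem pv_main (perspectives_off perspectives_on : List String) :
    count_blind_spots perspectives_off perspectives_on
      = count_blind_spots_alt perspectives_off perspectives_on := by
  unfold count_blind_spots count_blind_spots_alt
  simp only [PySem.List.foldl_if_add_one, PySem.List.sum_map_ite_one_zero, List.countP_map,
    zero_add, Int.natCast_inj]
  apply List.countP_congr
  intro p hp
  have hany := PySem.List.any_congr_mem
    (l := (PySem.Str.split₀ (PySem.Str.lower p)).filter (fun w => decide (3 < PySem.Str.len w)))
    (f := fun w => PySem.Str.isIn w
      (PySem.Str.join " " (perspectives_off.map (fun p => PySem.Str.lower p))))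
    (g := fun w => PySem.Set.contains (PySem.Set.ofList ((PySem.Set.ofList
      ((perspectives_on.map (fun p => (PySem.Str.split₀ (PySem.Str.lower p)).filter
        (fun w => decide (3 < PySem.Str.len w)))).flatMap
          (fun ws => ws.map PySem.Str.len))).flatMap (fun L =>
      (PySem.List.pyRange 0 (PySem.Str.len (PySem.Str.join " "
        (perspectives_off.map (fun p => PySem.Str.lower p))) - L + 1) 1).map
        (fun i => PySem.Str.slice (PySem.Str.join " "
          (perspectives_off.map (fun p => PySem.Str.lower p))) (some i) (some (i + L)))))) w)
    ?_
  · simp only [Function.comp_apply]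
    rw [hany]
  · intro w hwmem
    beta_reduce
    rw [pv_present_eq_isIn]
    · intro L hL
      rcases List.mem_flatMap.mp (PySem.Set.mem_ofList _ _ |>.mp hL) with ⟨ws, hws, hLmem⟩
      rcases List.mem_map.mp hws with ⟨q, hq, rfl⟩
      rcases List.mem_map.mp hLmem with ⟨w', hw', rfl⟩
      have := List.mem_filter.mp hw' |>.2
      simp only [decide_eq_true_eq] at this
      omega
    · apply (PySem.Set.mem_ofList _ _).mpr
      refine List.mem_flatMap.mpr ⟨(PySem.Str.split₀ (PySem.Str.lower p)).filter
        (fun w => decide (3 < PySem.Str.len w)), List.mem_map.mpr ⟨p, hp, rfl⟩, ?_⟩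
      rw [← PySem.Str.len_eq]
      exact List.mem_map.mpr ⟨w, hwmem, rfl⟩

-- ===== VERDICT (by name: the statement is the Claim_ definition above) =====
theorem count_blind_spots_spec : Claim_equal_count_blind_spots := by
  intro off on _; exact pv_main off on
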